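-- pv_equiv track=rewrite | github.com/eric-meehan/MusicalAlgorithmsAndFundamentalStructures | MusicFundamentals.py | CalculateInterval
-- ===== SOURCE A (Python) =====
-- def CalculateInterval(A, B):
--     """
--     This function is used to calculate the interval of a given pair of pitches.  It will always return the interval from
--     the bass reduced to be within an octave.
--     """
--
--     # Find the interval from the bass
--     if A >= B:
--         Interval = A - B
--     else:
--         Interval = B - A
--
--     # Continually reduce the interval by twelve until it fits within an octave
--     while Interval >= 12:
--         Interval = Interval - 12
--
--     # Send the result back to wherever this function was called
--     return Interval
-- ===== SOURCE B (Python) =====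
-- def CalculateInterval(A, B):
--     """Closed form: interval reduced within an octave via a single modulo."""
--     return abs(A - B) % 12
-- ===== Notes on version B (the rewrite author's own statement) =====
-- stated objective: simpler
-- what changed: Replaces the branch plus repeated-subtraction while-loop with the closed form abs(A-B) % 12.
import Mathlib
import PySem

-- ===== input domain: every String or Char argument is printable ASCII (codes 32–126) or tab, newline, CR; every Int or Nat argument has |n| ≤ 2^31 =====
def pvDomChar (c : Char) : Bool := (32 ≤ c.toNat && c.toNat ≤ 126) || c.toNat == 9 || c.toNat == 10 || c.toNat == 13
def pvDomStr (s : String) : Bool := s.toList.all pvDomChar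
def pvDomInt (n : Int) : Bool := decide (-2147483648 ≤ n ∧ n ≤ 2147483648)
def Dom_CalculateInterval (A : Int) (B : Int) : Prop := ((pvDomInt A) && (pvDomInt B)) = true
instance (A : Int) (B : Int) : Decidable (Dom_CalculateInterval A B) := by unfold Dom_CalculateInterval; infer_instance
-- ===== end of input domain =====

-- B replaces A's branch and repeated-subtraction loop with the closed form abs(A-B) % 12 (simpler).

-- ===== PORT A =====
-- the 'while Interval >= 12' loop, step for step
def calcReduce (i : Int) : Int :=
  if 12 ≤ i then calcReduce (i - 12) else i
termination_by i.toNat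
decreasing_by omega

def CalculateInterval (A : Int) (B : Int) : Int :=
  let Interval : Int := if A ≥ B then A - B else B - A
  calcReduce Interval

-- ===== PORT B =====
def CalculateInterval_alt (A : Int) (B : Int) : Int :=
  PySem.Int.mod |A - B| 12

-- ===== PRECONDITION & SPEC =====
def Spec_CalculateInterval (A : Int) (B : Int) (out : Int) : Prop := out = CalculateInterval_alt A B
instance (A : Int) (B : Int) (out : Int) : Decidable (Spec_CalculateInterval A B out) := by unfold Spec_CalculateInterval; infer_instance

-- ===== CLAIM (what is proved, stated in full; the proofs are below) =====
def Claim_equal_CalculateInterval : Prop := ∀ (A : Int) (B : Int), Dom_CalculateInterval A B → Spec_CalculateInterval A B (CalculateInterval A B)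

-- ===== LEMMAS AND PROOFS =====
theorem calcReduce_eq_emod (i : Int) (h : 0 ≤ i) : calcReduce i = i % 12 := by
  rw [calcReduce]
  split_ifs with h12
  · rw [calcReduce_eq_emod (i - 12) (by omega)]
    omega
  · omega
termination_by i.toNat
decreasing_by omega

-- ===== VERDICT (by name: the statement is the Claim_ definition above) =====
theorem CalculateInterval_spec : Claim_equal_CalculateInterval := by
  intro A B _
  unfold Spec_CalculateInterval CalculateInterval CalculateInterval_alt
  rw [PySem.Int.mod_eq_emod_of_pos (by norm_num)]
  show calcReduce (if A ≥ B then A - B else B - A) = _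
  by_cases hab : A ≥ B
  · simp only [hab, if_pos]
    rw [calcReduce_eq_emod _ (by omega)]
    congr 1
    rw [abs_of_nonneg (by omega : (0:Int) ≤ A - B)]
  · simp only [hab, if_neg, not_false_iff]
    rw [calcReduce_eq_emod _ (by omega)]
    congr 1
    rw [abs_of_nonpos (by omega : A - B ≤ 0)]
    ring
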